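-- pv_equiv track=rewrite | github.com/vinchinzu/euler | python/637.py | f
-- ===== SOURCE A (Python) =====
-- def sum_digits(n: int, base: int) -> int:
--     """Sum of digits in given base."""
--     result = 0
--     while n > 0:
--         result += n % base
--         n //= base
--     return result
--
-- def good(sum_val: int, remaining: int, base: int, sum_digits_arr: list[int]) -> bool:
--     """Check if we can reach single digit."""
--     if remaining == 0:
--         return sum_digits_arr[sum_val] < base
--
--     pow_base = base
--     while pow_base <= base * remaining:
--         if good(
--             sum_val + remaining % pow_base,
--             remaining // pow_base,
--             base,
--             sum_digits_arr,
--         ):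
--             return True
--         pow_base *= base
--     return False
--
-- def f(n: int, b: int) -> list[int]:
--     """Compute f values for all numbers up to n."""
--     sum_digits_arr = [0] * (n + 1)
--     f_arr = [0] * (n + 1)
--
--     for i in range(n + 1):
--         sum_digits_arr[i] = sum_digits(i, b)
--         if i < b:
--             f_arr[i] = 0
--         elif sum_digits_arr[i] < b:
--             f_arr[i] = 1
--         elif good(0, i, b, sum_digits_arr):
--             f_arr[i] = 2
--         else:
--             f_arr[i] = 3
--
--     return f_arr
-- ===== SOURCE B (Python) =====
-- def f(n, b):
--     """Compute f values for all numbers up to n.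
--
--     Digit sums by a DP (one division each) instead of a per-number division
--     loop, and a memoized search over (partial-sum, remaining-suffix) states
--     with a visited set instead of A's naive exponential partition recursion:
--     each state is explored at most once per number.
--     """
--     sd = [0] * (n + 1)
--     for i in range(1, n + 1):
--         sd[i] = sd[i // b] + i % b
--     out = []
--     for i in range(n + 1):
--         if i < b:
--             out.append(0)
--         elif sd[i] < b:
--             out.append(1)
--         else:
--             visited = set()
--             def dfs(sv, r):
--                 if r == 0:
--                     return sd[sv] < b
--                 if (sv, r) in visited:
--                     return False
--                 pw = b
--                 while pw <= b * r:
--                     if dfs(sv + r % pw, r // pw):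
--                         return True
--                     pw *= b
--                 visited.add((sv, r))
--                 return False
--             out.append(2 if dfs(0, i) else 3)
--     return out
-- ===== Notes on version B (the rewrite author's own statement) =====
-- stated objective: alternative
-- what changed: Replaces A's naive exponential partition recursion good() with a per-number memoized depth-first search over (partial-sum, remaining-suffix) states pruned by a visited set (each state explored at most once), and computes all digit sums by the DP sd[i] = sd[i//b] + i%b instead of a division loop per number.
-- outside the precondition, e.g. on f(0, 0): A returns [3], B returns [3]; on f(6, -4): A returns [3, 3, 3, 3, 3, 3, 3], B returns [3, 3, 3, 3, 3, 3, 1]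
import Mathlib
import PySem

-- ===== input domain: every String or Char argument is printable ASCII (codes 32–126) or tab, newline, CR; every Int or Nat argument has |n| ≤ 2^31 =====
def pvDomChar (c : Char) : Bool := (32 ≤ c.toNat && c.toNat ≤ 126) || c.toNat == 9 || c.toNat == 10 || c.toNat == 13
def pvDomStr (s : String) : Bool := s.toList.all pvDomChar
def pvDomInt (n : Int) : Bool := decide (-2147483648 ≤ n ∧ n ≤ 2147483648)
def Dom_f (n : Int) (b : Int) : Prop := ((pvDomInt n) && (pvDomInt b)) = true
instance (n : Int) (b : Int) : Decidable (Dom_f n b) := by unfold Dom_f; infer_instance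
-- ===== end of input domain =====

-- B replaces A's naive exponential partition recursion by a per-number memoized DFS over
-- (partial-sum, suffix) states with a visited set, plus a digit-sum DP (objective: alternative).

-- ===== PORT A =====
-- while n > 0: result += n % base; n //= base   (fuel n.toNat+1: the loop strictly shrinks n when 2 ≤ b; inputs with b < 2, n > 0 are outside Pre_f)
def sumDigitsLoop (fuel : Nat) (n b result : Int) : Int :=
  match fuel with
  | 0 => result
  | fuel + 1 =>
    if 0 < n then sumDigitsLoop fuel (PySem.Int.floordiv n b) b (result + PySem.Int.mod n b)
    else result

def sumDigitsA (n b : Int) : Int := sumDigitsLoop (n.toNat + 1) n b 0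

-- good(sum_val, remaining, base, arr): recursion + inner while over pow_base, with fuel
-- (both loops terminate only for 2 ≤ b; fuel 4*(b*i).toNat+12 is proved sufficient below).
-- arr[sum_val] is in range on every call reached from f with 2 ≤ b (chunk sums are ≤ i ≤ n): pyGet? ... |>.getD 0 is exact there.
mutual
def goodAux (fuel : Nat) (sumVal remaining b : Int) (arr : List Int) : Bool :=
  match fuel with
  | 0 => false
  | fuel + 1 =>
    if remaining == 0 then decide ((PySem.List.pyGet? arr sumVal).getD 0 < b)
    else goodLoop fuel sumVal remaining b arr b
def goodLoop (fuel : Nat) (sumVal remaining b : Int) (arr : List Int) (powBase : Int) : Bool :=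
  match fuel with
  | 0 => false
  | fuel + 1 =>
    if powBase ≤ b * remaining then
      if goodAux fuel (sumVal + PySem.Int.mod remaining powBase) (PySem.Int.floordiv remaining powBase) b arr then true
      else goodLoop fuel sumVal remaining b arr (powBase * b)
    else false
end

def f (n : Int) (b : Int) : List Int :=
  let init : List Int := List.replicate (n + 1).toNat 0
  let st := (PySem.List.pyRange 0 (n + 1) 1).foldl
    (fun (st : List Int × List Int) i =>
      let sdArr := PySem.List.pySetD st.1 i (sumDigitsA i b)
      let v : Int :=
        if i < b then 0
        else if PySem.List.pyGetD sdArr i 0 < b then 1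
        else if goodAux (4 * (b * i).toNat + 12) 0 i b sdArr then 2
        else 3
      (sdArr, PySem.List.pySetD st.2 i v))
    (init, init)
  st.2

-- ===== PORT B =====
-- dfs(sv, r): memoized search over (partial-sum, remaining-suffix) states; the Python
-- mutates a visited set, ported as threaded state (both loops terminate only for 2 <= b;
-- fuel 4*(b*i).toNat+12 is proved sufficient below). sd[sv] is in range on every call
-- reached from f_alt with 2 <= b (partial sums are <= i <= n): pyGetD is exact there.
mutual
def dfsB (fuel : Nat) (sd : List Int) (b : Int) (V : PySem.Set (Int × Int)) (sv r : Int) :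
    PySem.Set (Int × Int) × Bool :=
  match fuel with
  | 0 => (V, false)
  | fuel + 1 =>
    if r == 0 then (V, decide (PySem.List.pyGetD sd sv 0 < b))
    else if V.contains (sv, r) then (V, false)
    else dfsLoopB fuel sd b V sv r b
def dfsLoopB (fuel : Nat) (sd : List Int) (b : Int) (V : PySem.Set (Int × Int)) (sv r pw : Int) :
    PySem.Set (Int × Int) × Bool :=
  match fuel with
  | 0 => (V, false)
  | fuel + 1 =>
    if pw ≤ b * r then
      let res := dfsB fuel sd b V (sv + PySem.Int.mod r pw) (PySem.Int.floordiv r pw)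
      if res.2 then (res.1, true)
      else dfsLoopB fuel sd b res.1 sv r (pw * b)
    else (PySem.Set.add V (sv, r), false)
end

def f_alt (n : Int) (b : Int) : List Int :=
  let sd0 : List Int := List.replicate (n + 1).toNat 0
  let sd := (PySem.List.pyRange 1 (n + 1) 1).foldl
    (fun sd i =>
      PySem.List.pySetD sd i (PySem.List.pyGetD sd (PySem.Int.floordiv i b) 0 + PySem.Int.mod i b))
    sd0
  (PySem.List.pyRange 0 (n + 1) 1).foldl
    (fun out i =>
      out ++ [if i < b then (0 : Int)
        else if PySem.List.pyGetD sd i 0 < b then 1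
        else if (dfsB (4 * (b * i).toNat + 12) sd b PySem.Set.empty 0 i).2 then 2
        else 3])
    []

-- ===== PRECONDITION & SPEC =====
-- Pre_f restricts to the natural domain of a positional base, 2 ≤ b, plus all n < 0 (A returns []).
-- For n ≥ 1 A diverges at b = 1 and raises ZeroDivisionError at b = 0; the only excluded inputs on
-- which A still returns are n = 0 with b ≤ 1 and n ≥ 1 with b < 0, where A's digit arithmetic on a
-- degenerate/negative base is an artefact of its loops, not a specification.
def Pre_f (n : Int) (b : Int) : Prop := n < 0 ∨ 2 ≤ b
instance (n : Int) (b : Int) : Decidable (Pre_f n b) := by unfold Pre_f; infer_instance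
def pvWitness_f : Int × Int := (6, 2)

def Spec_f (n : Int) (b : Int) (out : List Int) : Prop := out = f_alt n b
instance (n : Int) (b : Int) (out : List Int) : Decidable (Spec_f n b out) := by unfold Spec_f; infer_instance

-- ===== CLAIM (what is proved, stated in full; the proofs are below) =====
def Claim_equal_f : Prop := ∀ (n : Int) (b : Int), Dom_f n b → Pre_f n b → Spec_f n b (f n b)

-- ===== LEMMAS AND PROOFS =====

-- digit-sum specification (well-founded on i.toNat; guarded, proof-layer only)
def sdSpec (b i : Int) : Int :=
  if h : 0 < i ∧ 2 ≤ b then PySem.Int.mod i b + sdSpec b (PySem.Int.floordiv i b) else 0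
termination_by i.toNat
decreasing_by
  have h1 : PySem.Int.floordiv i b = i / b := PySem.Int.floordiv_eq_ediv_of_pos (by omega)
  have h3 : 0 ≤ i / b := Int.ediv_nonneg (by omega) (by omega)
  have h4 : i / b * b ≤ i := Int.ediv_mul_le i (by omega)
  have h2 : i / b < i := by nlinarith
  simp [h1]; omega

-- canonical achievable-chunk-sum list (fuel spec shared by both proofs)
mutual
def reachS (fuel : Nat) (r b : Int) : List Int :=
  match fuel with
  | 0 => []
  | fuel + 1 => if r == 0 then [0] else reachLoopS fuel r b b
def reachLoopS (fuel : Nat) (r b pw : Int) : List Int :=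
  match fuel with
  | 0 => []
  | fuel + 1 =>
    if pw ≤ b * r then
      ((reachS fuel (PySem.Int.floordiv r pw) b).map (fun s => PySem.Int.mod r pw + s))
        ++ reachLoopS fuel r b (pw * b)
    else []
end

def Rch (b r : Int) : List Int := reachS (4 * (b * r).toNat + 12) r b

def Cls (b i : Int) : Int :=
  if i < b then 0
  else if sdSpec b i < b then 1
  else if (Rch b i).any (fun s => decide (sdSpec b s < b)) then 2
  else 3

-- arithmetic helpers
theorem flr_facts (r pw : Int) (hr : 0 ≤ r) (hpw : 2 ≤ pw) :
    0 ≤ PySem.Int.floordiv r pw ∧ 2 * PySem.Int.floordiv r pw ≤ r := by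
  rw [PySem.Int.floordiv_eq_ediv_of_pos (by omega)]
  have h3 : 0 ≤ r / pw := Int.ediv_nonneg (by omega) (by omega)
  have h4 : r / pw * pw ≤ r := Int.ediv_mul_le r (by omega)
  constructor
  · exact h3
  · nlinarith

theorem flr_nonneg (r pw : Int) (hr : 0 ≤ r) (hpw : 1 ≤ pw) : 0 ≤ PySem.Int.floordiv r pw := by
  rw [PySem.Int.floordiv_eq_ediv_of_pos (by omega)]
  exact Int.ediv_nonneg (by omega) (by omega)

theorem if_true_or (c d : Bool) : (if c then true else d) = (c || d) := by
  cases c <;> simp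

theorem sdSpec_pos (b i : Int) (h0 : 0 < i) (hb : 2 ≤ b) :
    sdSpec b i = PySem.Int.mod i b + sdSpec b (PySem.Int.floordiv i b) := by
  rw [sdSpec, dif_pos ⟨h0, hb⟩]

theorem sdSpec_zero (b i : Int) (h : ¬ 0 < i) : sdSpec b i = 0 := by
  rw [sdSpec, dif_neg (by tauto)]

theorem sumDigitsLoop_eq (b : Int) (hb : 2 ≤ b) :
    ∀ (fuel : Nat) (i : Int), 0 ≤ i → i.toNat < fuel → ∀ (acc : Int),
      sumDigitsLoop fuel i b acc = acc + sdSpec b i := by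
  intro fuel
  induction fuel with
  | zero => intro i hi hf; omega
  | succ fl ih =>
    intro i hi hf acc
    by_cases h0 : 0 < i
    · rw [sumDigitsLoop, if_pos h0]
      obtain ⟨hq0, hq2⟩ := flr_facts i b hi hb
      rw [ih _ hq0 (by omega)]
      rw [sdSpec_pos b i h0 hb]
      ring
    · rw [sumDigitsLoop, if_neg h0, sdSpec_zero b i h0]
      ring

-- L1: A's good equals an any-scan over the fuel-indexed reach list (same fuel, no hypotheses)
theorem good_eq_any (fuel : Nat) :
    (∀ sv r b arr, goodAux fuel sv r b arr =
      (reachS fuel r b).any (fun s => decide ((PySem.List.pyGet? arr (sv + s)).getD 0 < b))) ∧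
    (∀ sv r b arr pw, goodLoop fuel sv r b arr pw =
      (reachLoopS fuel r b pw).any (fun s => decide ((PySem.List.pyGet? arr (sv + s)).getD 0 < b))) := by
  induction fuel with
  | zero => exact ⟨fun _ _ _ _ => by simp [goodAux, reachS], fun _ _ _ _ _ => by simp [goodLoop, reachLoopS]⟩
  | succ fl ih =>
    constructor
    · intro sv r b arr
      rw [goodAux, reachS]
      by_cases hr : r == 0
      · simp [hr]
      · rw [if_neg hr, if_neg hr, ih.2]
    · intro sv r b arr pw
      rw [goodLoop, reachLoopS]
      by_cases hpw : pw ≤ b * r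
      · rw [if_pos hpw, if_pos hpw, ih.1, ih.2, if_true_or, List.any_append, List.any_map]
        have hfun : (fun s => decide ((PySem.List.pyGet? arr (sv + PySem.Int.mod r pw + s)).getD 0 < b))
            = ((fun s => decide ((PySem.List.pyGet? arr (sv + s)).getD 0 < b)) ∘ (fun s => PySem.Int.mod r pw + s)) := by
          funext s
          simp [Function.comp, add_assoc]
        rw [hfun]
      · simp [hpw]

-- bounds: members of reachS are chunk sums, 0 ≤ s ≤ r
theorem reachS_bounds (fuel : Nat) :
    (∀ r b s, 2 ≤ b → 0 ≤ r → s ∈ reachS fuel r b → 0 ≤ s ∧ s ≤ r) ∧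
    (∀ r b pw s, 2 ≤ b → 0 ≤ r → 1 ≤ pw → s ∈ reachLoopS fuel r b pw → 0 ≤ s ∧ s ≤ r) := by
  induction fuel with
  | zero => exact ⟨fun r b s _ _ h => by simp [reachS] at h, fun r b pw s _ _ _ h => by simp [reachLoopS] at h⟩
  | succ fl ih =>
    constructor
    · intro r b s hb hr hs
      rw [reachS] at hs
      by_cases h0 : r == 0
      · simp [h0] at hs
        have : r = 0 := by simpa using h0
        omega
      · rw [if_neg h0] at hs
        exact ih.2 r b b s hb hr (by omega) hs
    · intro r b pw s hb hr hpw hs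
      rw [reachLoopS] at hs
      by_cases hc : pw ≤ b * r
      · rw [if_pos hc] at hs
        rw [List.mem_append] at hs
        cases hs with
        | inl h =>
          rw [List.mem_map] at h
          obtain ⟨s0, hs0, rfl⟩ := h
          have hq0 : 0 ≤ PySem.Int.floordiv r pw := flr_nonneg r pw hr (by omega)
          obtain ⟨h1, h2⟩ := ih.1 _ b s0 hb hq0 hs0
          have hm0 : 0 ≤ PySem.Int.mod r pw := PySem.Int.mod_nonneg r (by omega)
          have hid : PySem.Int.floordiv r pw * pw + PySem.Int.mod r pw = r :=
            PySem.Int.floordiv_mul_add_mod r pw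
          have hqq : PySem.Int.floordiv r pw ≤ PySem.Int.floordiv r pw * pw :=
            le_mul_of_one_le_right hq0 (by omega)
          omega
        | inr h => exact ih.2 r b (pw * b) s hb hr (by nlinarith) h
      · rw [if_neg hc] at hs
        simp at hs

-- fuel stability: any fuel ≥ 4*(b*r).toNat+12 gives the canonical list
theorem reachLoopS_stable (b : Int) (hb : 2 ≤ b) (r : Int) (hr : 1 ≤ r)
    (IH : ∀ r', 0 ≤ r' → r'.toNat < r.toNat → ∀ g g',
      4 * (b * r').toNat + 12 ≤ g → 4 * (b * r').toNat + 12 ≤ g' →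
      reachS g r' b = reachS g' r' b) :
    ∀ (m : Nat) (pw : Int) (fl fl' : Nat), 2 ≤ pw → (b * r + 1 - pw).toNat ≤ m →
      m + 3 * (b * r).toNat + 10 ≤ fl → m + 3 * (b * r).toNat + 10 ≤ fl' →
      reachLoopS fl r b pw = reachLoopS fl' r b pw := by
  intro m
  induction m with
  | zero =>
    intro pw fl fl' hpw hm hfl hfl'
    have hbr : 2 ≤ b * r := by nlinarith
    have hgt : b * r < pw := by omega
    obtain ⟨fa, rfl⟩ : ∃ fa, fl = fa + 1 := ⟨fl - 1, by omega⟩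
    obtain ⟨fb, rfl⟩ : ∃ fb, fl' = fb + 1 := ⟨fl' - 1, by omega⟩
    rw [reachLoopS, reachLoopS, if_neg (by omega), if_neg (by omega)]
  | succ m ihm =>
    intro pw fl fl' hpw hm hfl hfl'
    have hbr : 2 ≤ b * r := by nlinarith
    obtain ⟨fa, rfl⟩ : ∃ fa, fl = fa + 1 := ⟨fl - 1, by omega⟩
    obtain ⟨fb, rfl⟩ : ∃ fb, fl' = fb + 1 := ⟨fl' - 1, by omega⟩
    rw [reachLoopS, reachLoopS]
    by_cases hc : pw ≤ b * r
    · rw [if_pos hc, if_pos hc]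
      -- the recursive argument is at most half of r
      obtain ⟨hq0, hq2⟩ := flr_facts r pw (by omega) hpw
      have hqlt : (PySem.Int.floordiv r pw).toNat < r.toNat := by omega
      have hbq : 2 * (b * PySem.Int.floordiv r pw) ≤ b * r := by nlinarith
      have hbq0 : 0 ≤ b * PySem.Int.floordiv r pw := by nlinarith
      have hmu : 4 * (b * PySem.Int.floordiv r pw).toNat + 12 ≤ fa ∧
          4 * (b * PySem.Int.floordiv r pw).toNat + 12 ≤ fb := by omega
      have hrec := IH _ hq0 hqlt fa fb hmu.1 hmu.2
      have hpwb : pw + 2 ≤ pw * b := by nlinarith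
      have hloop := ihm (pw * b) fa fb (by omega) (by omega) (by omega) (by omega)
      rw [hrec, hloop]
    · rw [if_neg hc, if_neg hc]

theorem reachS_stable (b : Int) (hb : 2 ≤ b) :
    ∀ (r : Int), 0 ≤ r → ∀ (g g' : Nat),
      4 * (b * r).toNat + 12 ≤ g → 4 * (b * r).toNat + 12 ≤ g' →
      reachS g r b = reachS g' r b := by
  intro r
  induction hk : r.toNat using Nat.strong_induction_on generalizing r with
  | _ k IH =>
    intro hr g g' hg hg'
    obtain ⟨ga, rfl⟩ : ∃ ga, g = ga + 1 := ⟨g - 1, by omega⟩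
    obtain ⟨gb, rfl⟩ : ∃ gb, g' = gb + 1 := ⟨g' - 1, by omega⟩
    rw [reachS, reachS]
    by_cases h0 : r == 0
    · rw [if_pos h0, if_pos h0]
    · rw [if_neg h0, if_neg h0]
      have hr1 : 1 ≤ r := by
        have : ¬ r = 0 := by simpa using h0
        omega
      have hbr : 2 ≤ b * r := by nlinarith
      exact reachLoopS_stable b hb r hr1
        (fun r' hr'0 hr'lt g g' hgg hgg' => IH r'.toNat (by omega) r' rfl hr'0 g g' hgg hgg')
        (b * r).toNat b ga gb hb (by omega) (by omega) (by omega)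

-- partially-filled array: first t entries carry g, the rest are the initial zeros
def stamp (N t : Nat) (g : Nat → Int) : List Int :=
  (List.range N).map (fun j => if j < t then g j else 0)

theorem stamp_length (N t : Nat) (g : Nat → Int) : (stamp N t g).length = N := by
  simp [stamp]

theorem stamp_zero (N : Nat) (g : Nat → Int) : stamp N 0 g = List.replicate N 0 := by
  apply List.ext_getElem
  · simp [stamp]
  · intro j h1 h2
    simp [stamp]

theorem stamp_one (N : Nat) (g : Nat → Int) (hg : g 0 = 0) : stamp N 1 g = List.replicate N 0 := by
  apply List.ext_getElem
  · simp [stamp]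
  · intro j h1 h2
    simp [stamp]
    intro hj
    subst hj
    exact hg

theorem stamp_full (N : Nat) (g : Nat → Int) : stamp N N g = (List.range N).map (fun j => g j) := by
  apply List.ext_getElem
  · simp [stamp]
  · intro j h1 h2
    have hj : j < N := by rwa [stamp_length] at h1
    simp [stamp, hj]

theorem stamp_set (N t : Nat) (g : Nat → Int) (ht : t < N) (v : Int) (hv : v = g t) :
    (stamp N t g).set t v = stamp N (t + 1) g := by
  apply List.ext_getElem
  · simp [stamp]
  · intro j h1 h2
    rw [List.getElem_set]
    simp only [stamp, List.getElem_map, List.getElem_range]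
    by_cases hj : t = j
    · subst hj
      simp [hv]
    · rw [if_neg hj]
      have : (j < t) = (j < t + 1) := by
        apply propext
        omega
      simp [this]

theorem stamp_getElem (N t j : Nat) (g : Nat → Int) (hj : j < N) :
    (stamp N t g)[j]'(by rw [stamp_length]; exact hj) = if j < t then g j else 0 := by
  simp [stamp]

theorem stamp_getD (N t j : Nat) (g : Nat → Int) (hj : j < N) :
    (stamp N t g).getD j 0 = if j < t then g j else 0 := by
  rw [List.getD_eq_getElem?_getD, List.getElem?_eq_getElem (by rw [stamp_length]; exact hj)]
  simp [stamp]

-- the body of A's main loop, named so the invariant can speak about it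
def stepA (b : Int) (st : List Int × List Int) (i : Int) : List Int × List Int :=
  let sdArr := PySem.List.pySetD st.1 i (sumDigitsA i b)
  let v : Int :=
    if i < b then 0
    else if PySem.List.pyGetD sdArr i 0 < b then 1
    else if goodAux (4 * (b * i).toNat + 12) 0 i b sdArr then 2
    else 3
  (sdArr, PySem.List.pySetD st.2 i v)

theorem lookup_stamp_full (N : Nat) (g : Nat → Int) (s : Int) (b : Int) (t : Nat)
    (hs0 : 0 ≤ s) (hst : s ≤ (t : Int)) (htN : t < N) :
    ((PySem.List.pyGet? (stamp N (t + 1) g) s).getD 0) = g s.toNat := by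
  rw [PySem.List.pyGet?_of_nonneg _ hs0]
  rw [List.getElem?_eq_getElem (by rw [stamp_length]; omega)]
  rw [Option.getD_some, stamp_getElem N (t + 1) s.toNat g (by omega)]
  rw [if_pos (by omega)]

theorem stepA_eq (n b : Int) (hn : 0 ≤ n) (hb : 2 ≤ b) (t : Nat) (ht : t < (n + 1).toNat) :
    stepA b (stamp (n + 1).toNat t (fun j => sdSpec b (j : Int)),
             stamp (n + 1).toNat t (fun j => Cls b (j : Int))) (t : Int)
      = (stamp (n + 1).toNat (t + 1) (fun j => sdSpec b (j : Int)),
         stamp (n + 1).toNat (t + 1) (fun j => Cls b (j : Int))) := by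
  have hsdA : sumDigitsA (t : Int) b = sdSpec b (t : Int) := by
    unfold sumDigitsA
    rw [sumDigitsLoop_eq b hb ((t : Int).toNat + 1) (t : Int) (Int.natCast_nonneg t) (by omega) 0]
    ring
  have hset1 : PySem.List.pySetD (stamp (n + 1).toNat t (fun j => sdSpec b (j : Int))) (t : Int)
      (sumDigitsA (t : Int) b) = stamp (n + 1).toNat (t + 1) (fun j => sdSpec b (j : Int)) := by
    rw [PySem.List.pySetD_natCast]
    exact stamp_set _ _ _ ht _ (by rw [hsdA])
  unfold stepA
  simp only [hset1]
  have hcond2 : PySem.List.pyGetD (stamp (n + 1).toNat (t + 1) (fun j => sdSpec b (j : Int))) (t : Int) 0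
      = sdSpec b (t : Int) := by
    rw [PySem.List.pyGetD_natCast, stamp_getD _ _ _ _ ht, if_pos (by omega)]
  have hcond3 : goodAux (4 * (b * (t : Int)).toNat + 12) 0 (t : Int) b
      (stamp (n + 1).toNat (t + 1) (fun j => sdSpec b (j : Int)))
      = (Rch b (t : Int)).any (fun s => decide (sdSpec b s < b)) := by
    rw [(good_eq_any (4 * (b * (t : Int)).toNat + 12)).1]
    have : reachS (4 * (b * (t : Int)).toNat + 12) (t : Int) b = Rch b (t : Int) := rfl
    rw [this]
    apply PySem.List.any_congr_mem
    intro s hs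
    obtain ⟨hs0, hst⟩ := (reachS_bounds (4 * (b * (t : Int)).toNat + 12)).1 (t : Int) b s hb (Int.natCast_nonneg t) hs
    rw [zero_add, lookup_stamp_full _ _ _ b t hs0 hst ht]
    have : ((s.toNat : Nat) : Int) = s := by omega
    rw [this]
  have hv : (if (t : Int) < b then (0 : Int)
      else if PySem.List.pyGetD (stamp (n + 1).toNat (t + 1) (fun j => sdSpec b (j : Int))) (t : Int) 0 < b then 1
      else if goodAux (4 * (b * (t : Int)).toNat + 12) 0 (t : Int) b
        (stamp (n + 1).toNat (t + 1) (fun j => sdSpec b (j : Int))) then 2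
      else 3) = Cls b (t : Int) := by
    rw [hcond2, hcond3, Cls]
  rw [hv]
  have hset2 : PySem.List.pySetD (stamp (n + 1).toNat t (fun j => Cls b (j : Int))) (t : Int)
      (Cls b (t : Int)) = stamp (n + 1).toNat (t + 1) (fun j => Cls b (j : Int)) := by
    rw [PySem.List.pySetD_natCast]
    exact stamp_set _ _ _ ht _ (by simp)
  rw [hset2]

theorem foldA (n b : Int) (hn : 0 ≤ n) (hb : 2 ≤ b) :
    ∀ t : Nat, t ≤ (n + 1).toNat →
      (PySem.List.pyRange 0 (t : Int) 1).foldl (stepA b)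
        (List.replicate (n + 1).toNat 0, List.replicate (n + 1).toNat 0)
      = (stamp (n + 1).toNat t (fun j => sdSpec b (j : Int)),
         stamp (n + 1).toNat t (fun j => Cls b (j : Int))) := by
  intro t
  induction t with
  | zero =>
    intro _
    rw [PySem.List.pyRange_one_eq_nil (by omega)]
    simp [stamp_zero]
  | succ t ih =>
    intro ht
    have hcast : ((t + 1 : Nat) : Int) = (t : Int) + 1 := by omega
    rw [hcast, PySem.List.pyRange_one_succ_right (by omega), List.foldl_append,
      ih (by omega), List.foldl_cons, List.foldl_nil, stepA_eq n b hn hb t (by omega)]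

theorem f_eq_map (n b : Int) (hn : 0 ≤ n) (hb : 2 ≤ b) :
    f n b = (List.range (n + 1).toNat).map (fun j : Nat => Cls b (j : Int)) := by
  have hrfl : f n b = ((PySem.List.pyRange 0 (n + 1) 1).foldl (stepA b)
      (List.replicate (n + 1).toNat 0, List.replicate (n + 1).toNat 0)).2 := rfl
  rw [hrfl]
  have h2 := foldA n b hn hb (n + 1).toNat (le_refl _)
  have hc : (((n + 1).toNat : Nat) : Int) = n + 1 := by omega
  rw [hc] at h2
  rw [h2]
  show stamp (n + 1).toNat (n + 1).toNat (fun j => Cls b (j : Int)) = _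
  rw [stamp_full]

-- the body of B's digit-sum loop
def stepSD (b : Int) (sd : List Int) (i : Int) : List Int :=
  PySem.List.pySetD sd i (PySem.List.pyGetD sd (PySem.Int.floordiv i b) 0 + PySem.Int.mod i b)

theorem stepSD_eq (n b : Int) (hb : 2 ≤ b) (t : Nat) (h1 : 1 ≤ t) (ht : t < (n + 1).toNat) :
    stepSD b (stamp (n + 1).toNat t (fun j => sdSpec b (j : Int))) (t : Int)
      = stamp (n + 1).toNat (t + 1) (fun j => sdSpec b (j : Int)) := by
  unfold stepSD
  obtain ⟨hq0, hq2⟩ := flr_facts (t : Int) b (Int.natCast_nonneg t) hb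
  have hqt : PySem.Int.floordiv (t : Int) b < (t : Int) := by omega
  have hget : PySem.List.pyGetD (stamp (n + 1).toNat t (fun j => sdSpec b (j : Int)))
      (PySem.Int.floordiv (t : Int) b) 0 = sdSpec b (PySem.Int.floordiv (t : Int) b) := by
    rw [PySem.List.pyGetD_eq_getElem _ _ hq0 (by rw [stamp_length]; push_cast; omega)]
    rw [stamp_getElem _ _ _ _ (by omega), if_pos (by omega)]
    congr 1
    omega
  rw [hget, PySem.List.pySetD_natCast]
  apply stamp_set _ _ _ ht
  rw [sdSpec_pos b (t : Int) (by omega) hb]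
  ring

theorem foldSD (n b : Int) (hn : 0 ≤ n) (hb : 2 ≤ b) :
    ∀ t : Nat, 1 ≤ t → t ≤ (n + 1).toNat →
      (PySem.List.pyRange 1 (t : Int) 1).foldl (stepSD b) (List.replicate (n + 1).toNat 0)
        = stamp (n + 1).toNat t (fun j => sdSpec b (j : Int)) := by
  intro t
  induction t with
  | zero => omega
  | succ t ih =>
    intro _ ht
    by_cases ht1 : t = 0
    · subst ht1
      rw [show ((1 : Nat) : Int) = 1 from rfl, PySem.List.pyRange_one_eq_nil (by omega)]
      rw [List.foldl_nil, stamp_one]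
      simpa using sdSpec_zero b 0 (by omega)
    · have hcast : ((t + 1 : Nat) : Int) = (t : Int) + 1 := by omega
      rw [hcast, PySem.List.pyRange_one_succ_right (by omega), List.foldl_append,
        ih (by omega) (by omega), List.foldl_cons, List.foldl_nil,
        stepSD_eq n b hb t (by omega) (by omega)]

-- lookup in the fully-filled digit-sum array
theorem stampN_lookup (N : Nat) (g : Nat → Int) (x : Int) (h0 : 0 ≤ x) (hx : x < (N : Int)) :
    PySem.List.pyGetD (stamp N N g) x 0 = g x.toNat := by
  rw [PySem.List.pyGetD_eq_getElem _ _ h0 (by rw [stamp_length]; exact_mod_cast hx)]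
  rw [stamp_getElem _ _ _ _ (by omega), if_pos (by omega)]

theorem Rch_zero (b : Int) : Rch b 0 = [0] := by
  unfold Rch
  rw [show (4 * ((b * 0).toNat) + 12 : Nat) = 11 + 1 from by simp, reachS]
  simp

-- "state (sv, r) can reach a good final sum"
def Gp (sd : List Int) (b sv r : Int) : Prop :=
  ∃ s ∈ Rch b r, PySem.List.pyGetD sd (sv + s) 0 < b

-- every state recorded in the visited set is a failed one
def SoundV (sd : List Int) (b : Int) (V : PySem.Set (Int × Int)) : Prop :=
  ∀ p ∈ V, ¬ Gp sd b p.1 p.2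

theorem dfsLoop_ok (sd : List Int) (b : Int) (hb : 2 ≤ b) (r : Int) (hr : 1 ≤ r)
    (IH : ∀ r', 0 ≤ r' → r'.toNat < r.toNat → ∀ (V : PySem.Set (Int × Int)) (sv : Int) (fuel : Nat),
      SoundV sd b V → 4 * (b * r').toNat + 12 ≤ fuel →
      SoundV sd b (dfsB fuel sd b V sv r').1 ∧
        ((dfsB fuel sd b V sv r').2 = true ↔ Gp sd b sv r')) :
    ∀ (m : Nat) (pw : Int) (V : PySem.Set (Int × Int)) (sv : Int) (fl fl' : Nat),
      SoundV sd b V → 2 ≤ pw → (b * r + 1 - pw).toNat ≤ m →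
      m + 3 * (b * r).toNat + 10 ≤ fl → m + 3 * (b * r).toNat + 10 ≤ fl' →
      (Gp sd b sv r → ∃ s ∈ reachLoopS fl' r b pw, PySem.List.pyGetD sd (sv + s) 0 < b) →
      SoundV sd b (dfsLoopB fl sd b V sv r pw).1 ∧
        ((dfsLoopB fl sd b V sv r pw).2 = true ↔
          ∃ s ∈ reachLoopS fl' r b pw, PySem.List.pyGetD sd (sv + s) 0 < b) := by
  intro m
  induction m with
  | zero =>
    intro pw V sv fl fl' hV hpw hm hfl hfl' hrem
    have hbr : 2 ≤ b * r := by nlinarith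
    obtain ⟨fa, rfl⟩ : ∃ fa, fl = fa + 1 := ⟨fl - 1, by omega⟩
    obtain ⟨fb, rfl⟩ : ∃ fb, fl' = fb + 1 := ⟨fl' - 1, by omega⟩
    rw [dfsLoopB, reachLoopS, if_neg (by omega), if_neg (by omega)]
    refine ⟨?_, by simp⟩
    intro p hp
    rw [PySem.Set.mem_add] at hp
    cases hp with
    | inl h => exact hV p h
    | inr h =>
      subst h
      intro hG
      obtain ⟨s, hs, _⟩ := hrem hG
      rw [reachLoopS, if_neg (by omega)] at hs
      simp at hs
  | succ m ihm =>
    intro pw V sv fl fl' hV hpw hm hfl hfl' hrem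
    have hbr : 2 ≤ b * r := by nlinarith
    obtain ⟨fa, rfl⟩ : ∃ fa, fl = fa + 1 := ⟨fl - 1, by omega⟩
    obtain ⟨fb, rfl⟩ : ∃ fb, fl' = fb + 1 := ⟨fl' - 1, by omega⟩
    rw [dfsLoopB, reachLoopS]
    by_cases hc : pw ≤ b * r
    · rw [if_pos hc, if_pos hc]
      obtain ⟨hq0, hq2⟩ := flr_facts r pw (by omega) hpw
      have hqlt : (PySem.Int.floordiv r pw).toNat < r.toNat := by omega
      have hbq : 2 * (b * PySem.Int.floordiv r pw) ≤ b * r := by nlinarith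
      have hbq0 : 0 ≤ b * PySem.Int.floordiv r pw := by nlinarith
      have hpwb : pw + 2 ≤ pw * b := by nlinarith
      obtain ⟨hchildS, hchildG⟩ := IH (PySem.Int.floordiv r pw) hq0 hqlt V
        (sv + PySem.Int.mod r pw) fa hV (by omega)
      have hstab : reachS fb (PySem.Int.floordiv r pw) b = Rch b (PySem.Int.floordiv r pw) := by
        unfold Rch
        exact reachS_stable b hb _ hq0 fb _ (by omega) (by omega)
      have hApart : (∃ s ∈ (reachS fb (PySem.Int.floordiv r pw) b).map
            (fun s => PySem.Int.mod r pw + s), PySem.List.pyGetD sd (sv + s) 0 < b)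
          ↔ Gp sd b (sv + PySem.Int.mod r pw) (PySem.Int.floordiv r pw) := by
        unfold Gp
        rw [← hstab]
        constructor
        · rintro ⟨s, hs, hts⟩
          rw [List.mem_map] at hs
          obtain ⟨x, hx, rfl⟩ := hs
          exact ⟨x, hx, by rwa [← add_assoc] at hts⟩
        · rintro ⟨x, hx, htx⟩
          exact ⟨PySem.Int.mod r pw + x, List.mem_map.2 ⟨x, hx, rfl⟩, by rwa [← add_assoc]⟩
      by_cases hfound : (dfsB fa sd b V (sv + PySem.Int.mod r pw) (PySem.Int.floordiv r pw)).2 = true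
      · simp only [hfound, if_pos]
        refine ⟨hchildS, ?_⟩
        simp only [true_iff]
        have hGchild := hchildG.1 hfound
        obtain ⟨s, hs, hts⟩ := hApart.2 hGchild
        exact ⟨s, List.mem_append_left _ hs, hts⟩
      · rw [Bool.not_eq_true] at hfound
        simp only [hfound, Bool.false_eq_true, if_false]
        have hnGchild : ¬ Gp sd b (sv + PySem.Int.mod r pw) (PySem.Int.floordiv r pw) := by
          rw [← hchildG, hfound]
          simp
        have hrem' : Gp sd b sv r →
            ∃ s ∈ reachLoopS fb r b (pw * b), PySem.List.pyGetD sd (sv + s) 0 < b := by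
          intro hG
          obtain ⟨s, hs, hts⟩ := hrem hG
          rw [reachLoopS, if_pos hc, List.mem_append] at hs
          cases hs with
          | inl h => exact absurd (hApart.1 ⟨s, h, hts⟩) hnGchild
          | inr h => exact ⟨s, h, hts⟩
        obtain ⟨hS, hG⟩ := ihm (pw * b) _ sv fa fb hchildS (by omega) (by omega)
          (by omega) (by omega) hrem'
        refine ⟨hS, ?_⟩
        rw [hG]
        constructor
        · rintro ⟨s, hs, hts⟩
          exact ⟨s, List.mem_append_right _ hs, hts⟩
        · rintro ⟨s, hs, hts⟩
          rw [List.mem_append] at hs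
          cases hs with
          | inl h => exact absurd (hApart.1 ⟨s, h, hts⟩) hnGchild
          | inr h => exact ⟨s, h, hts⟩
    · rw [if_neg hc, if_neg hc]
      refine ⟨?_, by simp⟩
      intro p hp
      rw [PySem.Set.mem_add] at hp
      cases hp with
      | inl h => exact hV p h
      | inr h =>
        subst h
        intro hG
        obtain ⟨s, hs, _⟩ := hrem hG
        rw [reachLoopS, if_neg hc] at hs
        simp at hs

theorem dfs_ok (sd : List Int) (b : Int) (hb : 2 ≤ b) :
    ∀ (r : Int), 0 ≤ r → ∀ (V : PySem.Set (Int × Int)) (sv : Int) (fuel : Nat),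
      SoundV sd b V → 4 * (b * r).toNat + 12 ≤ fuel →
      SoundV sd b (dfsB fuel sd b V sv r).1 ∧
        ((dfsB fuel sd b V sv r).2 = true ↔ Gp sd b sv r) := by
  intro r
  induction hk : r.toNat using Nat.strong_induction_on generalizing r with
  | _ k IH =>
    intro hr V sv fuel hV hfuel
    obtain ⟨g, rfl⟩ : ∃ g, fuel = g + 1 := ⟨fuel - 1, by omega⟩
    rw [dfsB]
    by_cases h0 : r == 0
    · rw [if_pos h0]
      have hr0 : r = 0 := by simpa using h0
      subst hr0
      refine ⟨hV, ?_⟩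
      unfold Gp
      rw [Rch_zero]
      simp
    · rw [if_neg h0]
      have hr1 : 1 ≤ r := by
        have : ¬ r = 0 := by simpa using h0
        omega
      have hbr : 2 ≤ b * r := by nlinarith
      by_cases hc : PySem.Set.contains V (sv, r)
      · rw [if_pos hc]
        refine ⟨hV, ?_, ?_⟩
        · intro h
          exact absurd h (by simp)
        · intro hG
          exact absurd hG (hV (sv, r) ((PySem.Set.contains_iff _ _).1 hc))
      · rw [if_neg hc]
        have hid : Gp sd b sv r ↔
            ∃ s ∈ reachLoopS (4 * (b * r).toNat + 11) r b b,
              PySem.List.pyGetD sd (sv + s) 0 < b := by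
          unfold Gp Rch
          rw [show 4 * (b * r).toNat + 12 = (4 * (b * r).toNat + 11) + 1 from rfl,
            reachS, if_neg h0]
        obtain ⟨hS, hG⟩ := dfsLoop_ok sd b hb r hr1
          (fun r' hr'0 hr'lt V' sv' fuel' hV' hf' =>
            IH r'.toNat (by omega) r' rfl hr'0 V' sv' fuel' hV' hf')
          (b * r).toNat b V sv g (4 * (b * r).toNat + 11) hV hb (by omega) (by omega)
          (by omega) (hid.1)
        exact ⟨hS, by rw [hG, ← hid]⟩

-- the body of B's main loop
def stepB (b : Int) (sd : List Int) (out : List Int) (i : Int) : List Int :=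
  out ++ [if i < b then (0 : Int)
    else if PySem.List.pyGetD sd i 0 < b then 1
    else if (dfsB (4 * (b * i).toNat + 12) sd b PySem.Set.empty 0 i).2 then 2
    else 3]

theorem stepB_eq (n b : Int) (hb : 2 ≤ b) (t : Nat) (ht : t < (n + 1).toNat) (out : List Int) :
    stepB b (stamp (n + 1).toNat (n + 1).toNat (fun j => sdSpec b (j : Int))) out (t : Int)
      = out ++ [Cls b (t : Int)] := by
  have hlook : ∀ x : Int, 0 ≤ x → x ≤ (t : Int) →
      PySem.List.pyGetD (stamp (n + 1).toNat (n + 1).toNat (fun j => sdSpec b (j : Int))) x 0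
        = sdSpec b x := by
    intro x h0 hxt
    rw [stampN_lookup _ _ x h0 (by omega)]
    congr 1
    omega
  have hS0 : SoundV (stamp (n + 1).toNat (n + 1).toNat (fun j => sdSpec b (j : Int))) b
      PySem.Set.empty := by
    intro p hp
    simp [PySem.Set.empty] at hp
  have hcond3 : (dfsB (4 * (b * (t : Int)).toNat + 12)
        (stamp (n + 1).toNat (n + 1).toNat (fun j => sdSpec b (j : Int))) b
        PySem.Set.empty 0 (t : Int)).2
      = (Rch b (t : Int)).any (fun s => decide (sdSpec b s < b)) := by
    have h := (dfs_ok _ b hb (t : Int) (Int.natCast_nonneg t) PySem.Set.empty 0 _ hS0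
      (le_refl _)).2
    rw [Bool.eq_iff_iff, h, List.any_eq_true]
    unfold Gp
    constructor
    · rintro ⟨s, hs, hts⟩
      obtain ⟨hs0, hst⟩ := (reachS_bounds _).1 (t : Int) b s hb (Int.natCast_nonneg t) hs
      rw [zero_add, hlook s hs0 hst] at hts
      exact ⟨s, hs, by simpa using hts⟩
    · rintro ⟨s, hs, hts⟩
      obtain ⟨hs0, hst⟩ := (reachS_bounds _).1 (t : Int) b s hb (Int.natCast_nonneg t) hs
      refine ⟨s, hs, ?_⟩
      rw [zero_add, hlook s hs0 hst]
      simpa using hts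
  unfold stepB
  rw [hlook (t : Int) (Int.natCast_nonneg t) (le_refl _), hcond3, Cls]

theorem foldB (n b : Int) (hn : 0 ≤ n) (hb : 2 ≤ b) :
    ∀ t : Nat, t ≤ (n + 1).toNat →
      (PySem.List.pyRange 0 (t : Int) 1).foldl
          (stepB b (stamp (n + 1).toNat (n + 1).toNat (fun j => sdSpec b (j : Int)))) []
        = (List.range t).map (fun j : Nat => Cls b (j : Int)) := by
  intro t
  induction t with
  | zero =>
    intro _
    rw [PySem.List.pyRange_one_eq_nil (by omega)]
    simp
  | succ t ih =>
    intro ht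
    have hcast : ((t + 1 : Nat) : Int) = (t : Int) + 1 := by omega
    rw [hcast, PySem.List.pyRange_one_succ_right (by omega), List.foldl_append,
      ih (by omega), List.foldl_cons, List.foldl_nil, stepB_eq n b hb t (by omega),
      List.range_succ, List.map_append]
    simp

theorem f_alt_eq_map (n b : Int) (hn : 0 ≤ n) (hb : 2 ≤ b) :
    f_alt n b = (List.range (n + 1).toNat).map (fun j : Nat => Cls b (j : Int)) := by
  have hrfl : f_alt n b = (PySem.List.pyRange 0 (n + 1) 1).foldl
      (stepB b ((PySem.List.pyRange 1 (n + 1) 1).foldl (stepSD b) (List.replicate (n + 1).toNat 0)))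
      [] := rfl
  rw [hrfl]
  have hsd := foldSD n b hn hb (n + 1).toNat (by omega) (le_refl _)
  have hc : (((n + 1).toNat : Nat) : Int) = n + 1 := by omega
  rw [hc] at hsd
  rw [hsd]
  have h := foldB n b hn hb (n + 1).toNat (le_refl _)
  rw [hc] at h
  exact h

-- ===== VERDICT (by name: the statement is the Claim_ definition above) =====
theorem f_spec : Claim_equal_f := by
  intro n b _hdom hpre
  unfold Spec_f
  by_cases hn : n < 0
  · have h0 : (n + 1).toNat = 0 := by omega
    have hr : PySem.List.pyRange 0 (n + 1) 1 = [] := PySem.List.pyRange_one_eq_nil (by omega)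
    simp [f, f_alt, h0, hr]
  · have hb : 2 ≤ b := by
      cases hpre with
      | inl h => omega
      | inr h => exact h
    rw [f_eq_map n b (by omega) hb, f_alt_eq_map n b (by omega) hb]
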